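-- pv_equiv track=rewrite | github.com/igabr/TTIC_NLP | Assignment_3/utils.py | generate_trigrams
-- ===== SOURCE A (Python) =====
-- def generate_trigrams(tweet_lst):
--     """
--     Given a tweet in list for, generates all valid trigrams.
--     """
--     assert type(tweet_lst) == list, "Your tweet must be a list of words."
--
--     trigram_lst = []
--
--     if len(tweet_lst) == 1: # rare case.
--         start_word = "<s>"
--         center_word = tweet_lst[0]
--         subseq_word = "</s>"
--         trigram_lst.append((start_word, center_word, subseq_word))
--     else:
--         for index, value in enumerate(tweet_lst):
--             if index == 0:
--                 start_word = "<s>"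
--                 center_word = tweet_lst[index]
--                 subseq_word = tweet_lst[index+1]
--             elif index == len(tweet_lst) - 1:
--                 start_word = tweet_lst[index-1]
--                 center_word = tweet_lst[index]
--                 subseq_word = "</s>"
--             else:
--                 start_word = tweet_lst[index-1]
--                 center_word = tweet_lst[index]
--                 subseq_word = tweet_lst[index+1]
--
--             trigram_lst.append((start_word, center_word, subseq_word))
--
--     return trigram_lst
-- ===== SOURCE B (Python) =====
-- def generate_trigrams(tweet_lst):
--     """
--     Given a tweet in list form, generates all valid trigrams.
--     """
--     assert type(tweet_lst) == list, "Your tweet must be a list of words."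
--     padded = ["<s>"] + tweet_lst + ["</s>"]
--     return list(zip(padded, padded[1:], padded[2:]))
-- ===== Notes on version B (the rewrite author's own statement) =====
-- stated objective: simpler
-- what changed: Replaces the singleton special case and the three-way index branching inside an enumerate loop by padding the list with boundary markers once and zipping the padded list with its two shifted tails.
import Mathlib
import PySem

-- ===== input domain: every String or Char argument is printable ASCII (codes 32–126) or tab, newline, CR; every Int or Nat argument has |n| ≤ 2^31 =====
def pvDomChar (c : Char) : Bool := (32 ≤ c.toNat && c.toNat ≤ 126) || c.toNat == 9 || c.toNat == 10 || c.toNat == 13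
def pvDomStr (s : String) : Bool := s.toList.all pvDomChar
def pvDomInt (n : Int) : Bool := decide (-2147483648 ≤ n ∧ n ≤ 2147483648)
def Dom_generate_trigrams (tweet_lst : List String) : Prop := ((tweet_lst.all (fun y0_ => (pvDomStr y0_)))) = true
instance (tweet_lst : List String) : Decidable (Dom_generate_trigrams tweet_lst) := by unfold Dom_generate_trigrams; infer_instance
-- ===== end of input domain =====

-- B pads the list with the boundary markers once and zips three shifted views, removing A's
-- singleton special case and the per-index branching (objective: simpler).

-- ===== PORT A =====
-- All indexing in A's reachable branches is in range (the loop only runs when len ≠ 1,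
-- and index±1 stays inside the list there), so pyGetD with a default "" is exact.
def generate_trigrams (tweet_lst : List String) : List (String × String × String) :=
  if tweet_lst.length = 1 then
    [("<s>", PySem.List.pyGetD tweet_lst 0 "", "</s>")]
  else
    (PySem.List.enumerate tweet_lst).foldl (fun acc iv =>
      let index := iv.1
      let t :=
        if index = 0 then
          ("<s>", PySem.List.pyGetD tweet_lst index "", PySem.List.pyGetD tweet_lst (index + 1) "")
        else if index = (tweet_lst.length : Int) - 1 then
          (PySem.List.pyGetD tweet_lst (index - 1) "", PySem.List.pyGetD tweet_lst index "", "</s>")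
        else
          (PySem.List.pyGetD tweet_lst (index - 1) "", PySem.List.pyGetD tweet_lst index "",
           PySem.List.pyGetD tweet_lst (index + 1) "")
      acc ++ [t]) []

-- ===== PORT B =====
def generate_trigrams_alt (tweet_lst : List String) : List (String × String × String) :=
  let padded := ["<s>"] ++ tweet_lst ++ ["</s>"]
  List.zipWith3 (fun a b c => (a, b, c)) padded (padded.drop 1) (padded.drop 2)

-- ===== PRECONDITION & SPEC =====
def Spec_generate_trigrams (tweet_lst : List String) (out : List (String × String × String)) : Prop := out = generate_trigrams_alt tweet_lst
instance (tweet_lst : List String) (out : List (String × String × String)) : Decidable (Spec_generate_trigrams tweet_lst out) := by unfold Spec_generate_trigrams; infer_instance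

-- ===== CLAIM (what is proved, stated in full; the proofs are below) =====
def Claim_equal_generate_trigrams : Prop := ∀ (tweet_lst : List String), Dom_generate_trigrams tweet_lst → Spec_generate_trigrams tweet_lst (generate_trigrams tweet_lst)

-- ===== LEMMAS AND PROOFS =====

theorem pv_zipWith3_length {α β γ δ : Type} (g : α → β → γ → δ) :
    ∀ (as : List α) (bs : List β) (cs : List γ),
      (List.zipWith3 g as bs cs).length = min as.length (min bs.length cs.length)
  | [], _, _ => by simp [List.zipWith3]
  | _ :: _, [], _ => by simp [List.zipWith3]
  | _ :: _, _ :: _, [] => by simp [List.zipWith3]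
  | a :: as, b :: bs, c :: cs => by
      simp [List.zipWith3, pv_zipWith3_length g as bs cs]

theorem pv_zipWith3_getElem {α β γ δ : Type} (g : α → β → γ → δ) :
    ∀ (as : List α) (bs : List β) (cs : List γ) (i : Nat)
      (h : i < (List.zipWith3 g as bs cs).length)
      (ha : i < as.length) (hb : i < bs.length) (hc : i < cs.length),
      (List.zipWith3 g as bs cs)[i] = g as[i] bs[i] cs[i]
  | a :: as, b :: bs, c :: cs, 0, _, _, _, _ => rfl
  | a :: as, b :: bs, c :: cs, i + 1, h, ha, hb, hc => by
      simpa [List.zipWith3] using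
        pv_zipWith3_getElem g as bs cs i (by simpa [List.zipWith3] using h)
          (by simpa using ha) (by simpa using hb) (by simpa using hc)

-- element i of the padded list ["<s>"] ++ l ++ ["</s>"]
theorem pv_padded_getElem (l : List String) (i : Nat) (h : i < l.length + 2) :
    (["<s>"] ++ l ++ ["</s>"])[i]'(by simp; omega) =
      if i = 0 then "<s>" else if i ≤ l.length then l.getD (i - 1) "" else "</s>" := by
  rcases i with _ | j
  · simp
  · simp only [List.cons_append, List.getElem_cons_succ, List.nil_append]
    by_cases hj : j < l.length
    · rw [List.getElem_append_left hj]
      have hj' : j + 1 ≤ l.length := hj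
      simp [hj', List.getD_eq_getElem?_getD, List.getElem?_eq_getElem hj]
    · have hje : j = l.length := by omega
      subst hje
      rw [List.getElem_append_right (by omega)]
      simp

theorem pv_alt_length (l : List String) : (generate_trigrams_alt l).length = l.length := by
  unfold generate_trigrams_alt
  rw [pv_zipWith3_length]
  simp
  omega

theorem pv_alt_getElem (l : List String) (i : Nat) (h : i < (generate_trigrams_alt l).length) :
    (generate_trigrams_alt l)[i] =
      ((["<s>"] ++ l ++ ["</s>"])[i]'(by rw [pv_alt_length] at h; simp; omega),
       (["<s>"] ++ l ++ ["</s>"])[i + 1]'(by rw [pv_alt_length] at h; simp; omega),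
       (["<s>"] ++ l ++ ["</s>"])[i + 2]'(by rw [pv_alt_length] at h; simp; omega)) := by
  have hn := pv_alt_length l
  unfold generate_trigrams_alt
  rw [pv_zipWith3_getElem]
  · simp
  · simp; rw [pv_alt_length] at h; omega
  · simp; rw [pv_alt_length] at h; omega
  · simp; rw [pv_alt_length] at h; omega

-- A's loop body as a map over enumerate
theorem pv_A_eq_map (l : List String) (hne : l.length ≠ 1) :
    generate_trigrams l =
      (PySem.List.enumerate l).map (fun iv =>
        if iv.1 = 0 then
          ("<s>", PySem.List.pyGetD l iv.1 "", PySem.List.pyGetD l (iv.1 + 1) "")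
        else if iv.1 = (l.length : Int) - 1 then
          (PySem.List.pyGetD l (iv.1 - 1) "", PySem.List.pyGetD l iv.1 "", "</s>")
        else
          (PySem.List.pyGetD l (iv.1 - 1) "", PySem.List.pyGetD l iv.1 "",
           PySem.List.pyGetD l (iv.1 + 1) "")) := by
  unfold generate_trigrams
  rw [if_neg hne]
  exact PySem.List.foldl_append_singleton_eq_map _ _ _

theorem generate_trigrams_eq (l : List String) : generate_trigrams l = generate_trigrams_alt l := by
  by_cases h1 : l.length = 1
  · obtain ⟨x, hx⟩ := List.length_eq_one_iff.mp h1
    subst hx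
    simp [generate_trigrams, generate_trigrams_alt, List.zipWith3, PySem.List.pyGetD]
  · have hA := pv_A_eq_map l h1
    apply List.ext_getElem
    · rw [hA, pv_alt_length]
      simp [PySem.List.length_enumerate]
    · intro i hi hialt
      have hn : i < l.length := by rw [pv_alt_length] at hialt; exact hialt
      have hlen2 : 2 ≤ l.length := by omega
      rw [List.getElem_of_eq hA, List.getElem_map, PySem.List.getElem_enumerate, pv_alt_getElem]
      rw [pv_padded_getElem l i (by omega), pv_padded_getElem l (i+1) (by omega),
        pv_padded_getElem l (i+2) (by omega)]
      have gi : PySem.List.pyGetD l ((i : Nat) : Int) "" = l.getD i "" := by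
        rw [PySem.List.pyGetD_natCast]
      by_cases h0 : i = 0
      · subst h0
        have g1 : PySem.List.pyGetD l 1 "" = l.getD 1 "" := by
          have e : (1 : Int) = ((1 : Nat) : Int) := rfl
          rw [e, PySem.List.pyGetD_natCast]
        have g0 : PySem.List.pyGetD l 0 "" = l.getD 0 "" := by
          have e : (0 : Int) = ((0 : Nat) : Int) := rfl
          rw [e, PySem.List.pyGetD_natCast]
        have c1 : 0 + 1 ≤ l.length := by omega
        have c2 : 0 + 2 ≤ l.length := by omega
        simp only [Nat.cast_zero, Int.zero_add]
        simp [g0, g1, List.getD_eq_getElem?_getD, c1, c2]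
      · have hne0 : ¬ ((i : Int) = 0) := by omega
        have efst : (i : Int) - 1 = ((i - 1 : Nat) : Int) := by omega
        have gfst : PySem.List.pyGetD l ((i : Int) - 1) "" = l.getD (i - 1) "" := by
          rw [efst, PySem.List.pyGetD_natCast]
        have c1 : i ≤ l.length := by omega
        have c2 : i + 1 ≤ l.length := by omega
        by_cases hl : i = l.length - 1
        · have hlast : (i : Int) = (l.length : Int) - 1 := by omega
          have c3 : ¬ (i + 2 ≤ l.length) := by omega
          simp only [Int.zero_add, if_neg hne0, if_pos hlast]
          simp [gfst, gi, List.getD_eq_getElem?_getD, h0, c1, c2, c3]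
        · have hnl : ¬ ((i : Int) = (l.length : Int) - 1) := by omega
          have esnd : (i : Int) + 1 = ((i + 1 : Nat) : Int) := by omega
          have gsnd : PySem.List.pyGetD l ((i : Int) + 1) "" = l.getD (i + 1) "" := by
            rw [esnd, PySem.List.pyGetD_natCast]
          have c3 : i + 2 ≤ l.length := by omega
          simp only [Int.zero_add, if_neg hne0, if_neg hnl]
          simp [gfst, gsnd, gi, List.getD_eq_getElem?_getD, h0, c1, c2, c3]

-- ===== VERDICT (by name: the statement is the Claim_ definition above) =====
theorem generate_trigrams_spec : Claim_equal_generate_trigrams := by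
  intro l _
  unfold Spec_generate_trigrams
  exact generate_trigrams_eq l
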